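-- pv_equiv track=rewrite | github.com/sinf/entropy | entropy.py | d2xy
-- ===== SOURCE A (Python) =====
-- def d2xy(n, d):
--     """ get (x,y) coordinate on hilbert curve. copy paste translate from wikipedia """
--     t=d
--     x,y=0,0
--     s=1
--     while s < n:
--         rx = 1 & (t >> 1)
--         ry = 1 & (t ^ rx)
--         if ry == 0:
--             if rx == 1:
--                 x = s-1 - x
--                 y = s-1 - y
--             x,y = y,x
--         x += s * rx
--         y += s * ry
--         t >>= 2
--         s *= 2
--     return x,y
-- ===== SOURCE B (Python) =====
-- def d2xy(n, d):
--     """ get (x,y) coordinate on hilbert curve: top-down recursion on levels """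
--     def rec(k, t):
--         if k == 0:
--             return (0, 0)
--         s = 1 << (k - 1)
--         q = t >> (2 * (k - 1))
--         rx = 1 & (q >> 1)
--         ry = 1 & (q ^ rx)
--         x, y = rec(k - 1, t)
--         if ry == 0:
--             if rx == 1:
--                 x, y = s - 1 - x, s - 1 - y
--             x, y = y, x
--         return (x + s * rx, y + s * ry)
--     levels = 0 if n <= 1 else (n - 1).bit_length()
--     return rec(levels, d)
-- ===== Notes on version B (the rewrite author's own statement) =====
-- stated objective: alternative
-- what changed: Replaces A's bottom-up while-loop that doubles the square size s from 1 with a top-down recursion on the level count computed in closed form from (n-1).bit_length(), peeling the most-significant bit-pair at each recursion step.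
import Mathlib
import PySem

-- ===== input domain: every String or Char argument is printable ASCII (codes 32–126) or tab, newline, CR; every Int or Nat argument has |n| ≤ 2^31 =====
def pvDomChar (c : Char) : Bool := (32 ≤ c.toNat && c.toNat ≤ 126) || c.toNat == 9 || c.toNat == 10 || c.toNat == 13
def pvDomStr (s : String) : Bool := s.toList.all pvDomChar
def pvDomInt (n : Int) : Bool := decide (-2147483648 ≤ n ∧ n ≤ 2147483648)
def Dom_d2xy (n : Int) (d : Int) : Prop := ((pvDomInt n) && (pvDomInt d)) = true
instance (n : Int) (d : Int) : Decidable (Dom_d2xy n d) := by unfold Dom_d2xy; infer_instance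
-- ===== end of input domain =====

-- B replaces A's bottom-up doubling while-loop by a top-down recursion on the level
-- count obtained from (n-1).bit_length(); same return values, different decomposition
-- (objective: alternative, not claimed faster).

-- ===== PORT A =====
-- A's while loop as fuel recursion; 64 iterations suffice for every n in Dom (s doubles
-- from 1 and the loop stops once s ≥ n ≥ -2^31 … 2^31), so the fuel guard never fires there.
def d2xyLoop : Nat → Int → Int → Int → Int → Int → Int × Int
  | 0, _, _, x, y, _ => (x, y)
  | fuel + 1, n, t, x, y, s =>
    if s < n then
      let rx := PySem.Int.band 1 (t >>> (1 : Nat))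
      let ry := PySem.Int.band 1 (PySem.Int.bxor t rx)
      let xy :=
        if ry == 0 then
          let xy := if rx == 1 then (s - 1 - x, s - 1 - y) else (x, y)
          (xy.2, xy.1)
        else (x, y)
      d2xyLoop fuel n (t >>> (2 : Nat)) (xy.1 + s * rx) (xy.2 + s * ry) (s * 2)
    else (x, y)

def d2xy (n : Int) (d : Int) : Int × Int := d2xyLoop 64 n d 0 0 1

-- ===== PORT B =====
-- rec(k, t) of Source B: peel the two most-significant bit-pairs via q = t >> 2(k-1)
def hilbertRec : Nat → Int → Int × Int
  | 0, _ => (0, 0)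
  | k + 1, t =>
    let s : Int := (1 : Int) <<< k
    let q := t >>> (2 * k)
    let rx := PySem.Int.band 1 (q >>> (1 : Nat))
    let ry := PySem.Int.band 1 (PySem.Int.bxor q rx)
    let xy := hilbertRec k t
    let xy :=
      if ry == 0 then
        let xy := if rx == 1 then (s - 1 - xy.1, s - 1 - xy.2) else xy
        (xy.2, xy.1)
      else xy
    (xy.1 + s * rx, xy.2 + s * ry)

def d2xy_alt (n : Int) (d : Int) : Int × Int :=
  let levels : Nat := if n ≤ 1 then 0 else PySem.Int.bitLength (n - 1)
  hilbertRec levels d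

-- ===== PRECONDITION & SPEC =====
def Spec_d2xy (n : Int) (d : Int) (out : Int × Int) : Prop := out = d2xy_alt n d
instance (n : Int) (d : Int) (out : Int × Int) : Decidable (Spec_d2xy n d out) := by unfold Spec_d2xy; infer_instance

-- ===== CLAIM (what is proved, stated in full; the proofs are below) =====
def Claim_equal_d2xy : Prop := ∀ (n : Int) (d : Int), Dom_d2xy n d → Spec_d2xy n d (d2xy n d)

-- ===== LEMMAS AND PROOFS =====

-- the level count B uses
def pvLevels (n : Int) : Nat := if n ≤ 1 then 0 else PySem.Int.bitLength (n - 1)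

lemma pvLevels_ge (n : Int) : n ≤ 2 ^ pvLevels n := by
  unfold pvLevels
  split
  · simpa using ‹n ≤ 1›
  · have h2 : (2 : Int) ≤ n := by omega
    have := PySem.Int.lt_two_pow_bitLength (n - 1)
    have hab : (n - 1).natAbs = (n - 1).toNat := by omega
    have : (n - 1).toNat < 2 ^ PySem.Int.bitLength (n - 1) := by omega
    have := (Nat.cast_lt (α := Int)).mpr this
    push_cast at this
    omega

lemma pvLevels_min (n : Int) (k : Nat) (hk : k < pvLevels n) : (2 : Int) ^ k < n := by
  unfold pvLevels at hk
  split at hk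
  · omega
  · have h2 : (2 : Int) ≤ n := by omega
    have hne : n - 1 ≠ 0 := by omega
    have hle := PySem.Int.two_pow_bitLength_le (n - 1) hne
    have hab : (n - 1).natAbs = (n - 1).toNat := by omega
    have hkk : k ≤ PySem.Int.bitLength (n - 1) - 1 := by omega
    have hpow : (2 : Nat) ^ k ≤ 2 ^ (PySem.Int.bitLength (n - 1) - 1) :=
      Nat.pow_le_pow_right (by omega) hkk
    have : (2 : Nat) ^ k ≤ (n - 1).toNat := by omega
    have := (Nat.cast_le (α := Int)).mpr this
    push_cast at this
    omega

lemma int_shiftRight_shiftRight (a : Int) (i j : Nat) : a >>> i >>> j = a >>> (i + j) := by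
  cases a <;> simp only [HShiftRight.hShiftRight, Int.shiftRight, Int.ofNat.injEq,
    Int.negSucc.injEq] <;> exact (Nat.shiftRight_add _ i j).symm

lemma key (fuel : Nat) : ∀ (j : Nat) (n d : Int), j ≤ pvLevels n → n ≤ 2 ^ (j + fuel) →
    d2xyLoop fuel n (d >>> (2 * j)) (hilbertRec j d).1 (hilbertRec j d).2 (2 ^ j)
      = hilbertRec (pvLevels n) d := by
  induction fuel with
  | zero =>
    intro j n d hj hle
    have : ¬ j < pvLevels n := fun h => absurd (pvLevels_min n j h) (by simpa using hle)
    have hj' : j = pvLevels n := by omega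
    subst hj'
    simp [d2xyLoop]
  | succ fuel ih =>
    intro j n d hj hle
    by_cases hs : (2 : Int) ^ j < n
    · have hjlt : j < pvLevels n := by
        by_contra h
        have : pvLevels n ≤ j := by omega
        have := pvLevels_ge n
        have : n ≤ 2 ^ j := le_trans this (by
          exact pow_le_pow_right₀ (by norm_num) (by omega))
        omega
      have step : d2xyLoop (fuel + 1) n (d >>> (2 * j)) (hilbertRec j d).1 (hilbertRec j d).2 (2 ^ j)
          = d2xyLoop fuel n (d >>> (2 * (j + 1))) (hilbertRec (j + 1) d).1 (hilbertRec (j + 1) d).2 (2 ^ (j + 1)) := by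
        rw [d2xyLoop]
        rw [if_pos hs]
        have h1 : (1 : Int) <<< j = 2 ^ j := by
          simp [Int.shiftLeft_eq, one_mul]
        have h2 : d >>> (2 * j) >>> (2 : Nat) = d >>> (2 * (j + 1)) := by
          rw [int_shiftRight_shiftRight]; ring_nf
        have h3 : (2 : Int) ^ j * 2 = 2 ^ (j + 1) := by ring
        rw [h2, h3]
        conv_rhs => rw [hilbertRec]
        simp only [h1, Prod.mk.eta]
      rw [step]
      exact ih (j + 1) n d (by omega) (by
        have : j + 1 + fuel = j + (fuel + 1) := by omega
        rw [this]; exact hle)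
    · have : ¬ j < pvLevels n := fun h => absurd (pvLevels_min n j h) hs
      have hj' : j = pvLevels n := by omega
      subst hj'
      rw [d2xyLoop]
      rw [if_neg hs]

-- ===== VERDICT (by name: the statement is the Claim_ definition above) =====
theorem d2xy_spec : Claim_equal_d2xy := by
  intro n d hdom
  unfold Spec_d2xy d2xy d2xy_alt
  have hdom' : n ≤ 2147483648 := by
    unfold Dom_d2xy pvDomInt at hdom
    simp only [Bool.and_eq_true, decide_eq_true_eq] at hdom
    exact hdom.1.2
  have h := key 64 0 n d (by omega) (by
    have : (2147483648 : Int) ≤ 2 ^ (0 + 64) := by norm_num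
    omega)
  simpa [hilbertRec, pvLevels] using h
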